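-- pv_equiv track=rewrite | github.com/McGill-NLP/latentlens | quickstart.py | _find_token_in_caption
-- ===== SOURCE A (Python) =====
-- def _find_token_in_caption(caption, token_str):
--     """
--     Find the best position of token_str in caption, respecting word boundaries.
--
--     BPE tokens starting with " " (space) should match at word boundaries, not
--     inside other words. E.g., " door" should match " door" in "white door", NOT
--     the "door" inside "doorway".
--
--     Returns character index in caption, or -1 if not found.
--     """
--     token_clean = token_str.strip().lower()
--     caption_lower = caption.lower()
--
--     # If original BPE token had a leading space, prefer word-boundary match
--     starts_word = token_str.startswith(" ")
--
--     if starts_word: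
--         # Try matching at word boundaries first: look for " token" or at position 0
--         # Search for space + token where the char AFTER is not alpha (end of match = word boundary or end)
--         search_with_space = " " + token_clean
--         pos = 0
--         while pos < len(caption_lower):
--             idx = caption_lower.find(search_with_space, pos)
--             if idx == -1:
--                 break
--             # Match starts after the space
--             match_start = idx + 1
--             match_end = match_start + len(token_clean)
--             # Accept if at end of string or next char is not alphanumeric (word boundary)
--             if match_end >= len(caption_lower) or not caption_lower[match_end].isalpha():
--                 return match_start
--             pos = idx + 1
--
--         # Also try at position 0 (caption starts with the token)
--         if caption_lower.startswith(token_clean):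
--             match_end = len(token_clean)
--             if match_end >= len(caption_lower) or not caption_lower[match_end].isalpha():
--                 return 0
--
--     # Fallback: first occurrence (for continuation tokens or if word-boundary match failed)
--     idx = caption_lower.find(token_clean)
--     return idx
-- ===== SOURCE B (Python) =====
-- def _find_token_in_caption(caption, token_str):
--     token_clean = token_str.strip().lower()
--     caption_lower = caption.lower()
--     n, m = len(caption_lower), len(token_clean)
--     occs = [i for i in range(n - m + 1) if caption_lower[i:i+m] == token_clean]
--     if token_str.startswith(" "):
--         for i in occs:
--             if i > 0 and caption_lower[i-1] == " " and (i + m >= n or not caption_lower[i+m].isalpha()):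
--                 return i
--         if occs and occs[0] == 0 and (m >= n or not caption_lower[m].isalpha()):
--             return 0
--     return occs[0] if occs else -1
-- ===== Notes on version B (the rewrite author's own statement) =====
-- stated objective: alternative
-- what changed: B first materialises the list of all start indices of the cleaned token via one slice-comparison comprehension and then answers every branch (word-boundary scan, position-0 check, fallback) by scanning that list, instead of A's stateful while-loop of repeated str.find calls plus separate startswith and find passes.
import Mathlib
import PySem

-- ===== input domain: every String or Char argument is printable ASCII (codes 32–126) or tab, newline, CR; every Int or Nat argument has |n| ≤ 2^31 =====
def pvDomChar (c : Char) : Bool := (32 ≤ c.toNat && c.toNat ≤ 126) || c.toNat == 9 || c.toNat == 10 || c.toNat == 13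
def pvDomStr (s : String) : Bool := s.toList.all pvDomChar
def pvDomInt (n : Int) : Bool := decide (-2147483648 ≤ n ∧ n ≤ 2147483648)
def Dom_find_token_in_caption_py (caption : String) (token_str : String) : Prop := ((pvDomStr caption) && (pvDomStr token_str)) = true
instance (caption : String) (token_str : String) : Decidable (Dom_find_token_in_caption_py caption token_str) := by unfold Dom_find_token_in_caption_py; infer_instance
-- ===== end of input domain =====

-- B replaces A's stateful while-loop of repeated str.find calls (plus separate startswith/find passes)
-- by one occurrence-list comprehension that every branch then scans; equivalence of the return values is proved.

-- ===== PORT A =====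
-- A's while-loop: repeatedly find " "+token_clean from pos; the local variables idx/match_start
-- of the Python body are inlined (same values).  caption_lower[match_end] is a guarded in-range
-- index, ported as List.getD (exact: the branch is only reached with match_end < len).
def aLoop (cap search : List Char) (m : Nat) (fuel : Nat) (pos : Nat) : Option Nat :=
  match fuel with
  | 0 => none
  | f + 1 =>
    if pos < cap.length then
      if PySem.Chars.findFrom cap search (pos : Int) = -1 then none
      else
        if cap.length ≤ (PySem.Chars.findFrom cap search (pos : Int)).toNat + 1 + m ∨
            PySem.Chars.isalpha (cap.getD ((PySem.Chars.findFrom cap search (pos : Int)).toNat + 1 + m) ' ') = false then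
          some ((PySem.Chars.findFrom cap search (pos : Int)).toNat + 1)
        else aLoop cap search m f ((PySem.Chars.findFrom cap search (pos : Int)).toNat + 1)
    else none

-- A's body after computing token_clean / caption_lower / starts_word
def aCore (cap tok : List Char) (sw : Bool) : Int :=
  if sw then
    match aLoop cap (' ' :: tok) tok.length cap.length 0 with
    | some ms => (ms : Int)
    | none =>
      if PySem.Chars.startswith cap tok = true ∧
          (cap.length ≤ tok.length ∨ PySem.Chars.isalpha (cap.getD tok.length ' ') = false) then
        0
      else PySem.Chars.find cap tok
  else PySem.Chars.find cap tok

def find_token_in_caption_py (caption : String) (token_str : String) : Int :=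
  aCore (PySem.Chars.lower caption.toList)
        (PySem.Chars.lower (PySem.Chars.strip token_str.toList))
        (PySem.Chars.startswith token_str.toList [' '])

-- ===== PORT B =====
-- the comprehension [i for i in range(n - m + 1) if caption_lower[i:i+m] == token_clean]
def bOccs (cap tok : List Char) : List Int :=
  (PySem.List.pyRange 0 ((cap.length : Int) - (tok.length : Int) + 1)).filter
    (fun i => PySem.List.slice cap (some i) (some (i + (tok.length : Int))) == tok)

-- B's body after computing token_clean / caption_lower / starts_word
def bCore (cap tok : List Char) (sw : Bool) : Int :=
  if sw then
    match (bOccs cap tok).find? (fun i =>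
        decide (0 < i) && (PySem.List.pyGet? cap (i - 1) == some ' ') &&
        (decide ((cap.length : Int) ≤ i + (tok.length : Int)) ||
          !(PySem.Chars.isalpha ((PySem.List.pyGet? cap (i + (tok.length : Int))).getD ' ')))) with
    | some i => i
    | none =>
      if ((match bOccs cap tok with | i :: _ => i == (0 : Int) | [] => false) &&
          (decide (cap.length ≤ tok.length) ||
            !(PySem.Chars.isalpha (cap.getD tok.length ' ')))) = true then 0
      else match bOccs cap tok with | i :: _ => i | [] => -1
  else match bOccs cap tok with | i :: _ => i | [] => -1

def find_token_in_caption_py_alt (caption : String) (token_str : String) : Int :=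
  bCore (PySem.Chars.lower caption.toList)
        (PySem.Chars.lower (PySem.Chars.strip token_str.toList))
        (PySem.Chars.startswith token_str.toList [' '])

-- ===== PRECONDITION & SPEC =====
def Spec_find_token_in_caption_py (caption : String) (token_str : String) (out : Int) : Prop := out = find_token_in_caption_py_alt caption token_str
instance (caption : String) (token_str : String) (out : Int) : Decidable (Spec_find_token_in_caption_py caption token_str out) := by unfold Spec_find_token_in_caption_py; infer_instance

-- ===== CLAIM (what is proved, stated in full; the proofs are below) =====
def Claim_equal_find_token_in_caption_py : Prop := ∀ (caption : String) (token_str : String), Dom_find_token_in_caption_py caption token_str → Spec_find_token_in_caption_py caption token_str (find_token_in_caption_py caption token_str)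

-- ===== LEMMAS AND PROOFS =====

-- boundary test after a match ending at i + |tok|
def bndB (cap tok : List Char) (i : Nat) : Bool :=
  decide (cap.length ≤ i + tok.length) || !(PySem.Chars.isalpha (cap.getD (i + tok.length) ' '))

-- A-side loop predicate on the raw find index
def PA (cap tok : List Char) (idx : Nat) : Bool :=
  decide ((' ' :: tok) <+: cap.drop idx) && bndB cap tok (idx + 1)

-- B-side combined predicate on the match-start index
def PB (cap tok : List Char) (k : Nat) : Bool :=
  decide (0 < k) && (cap[k-1]? == some ' ') && decide (tok <+: cap.drop k) && bndB cap tok k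

-- "first index ≥ pos (within cnt steps) satisfying p"
def scanP (p : Nat → Bool) (pos : Nat) (cnt : Nat) : Option Nat :=
  match cnt with
  | 0 => none
  | c + 1 => if p pos then some pos else scanP p (pos + 1) c

theorem scanP_eq_find?_range' (p : Nat → Bool) (cnt : Nat) :
    ∀ pos, scanP p pos cnt = (List.range' pos cnt).find? p := by
  induction cnt with
  | zero => intro pos; simp [scanP]
  | succ c ih =>
    intro pos
    rw [List.range'_succ]
    cases hp : p pos <;> simp [scanP, hp, ih]

theorem scanP_none (p : Nat → Bool) (cnt : Nat) :
    ∀ pos, (∀ j, pos ≤ j → j < pos + cnt → p j = false) → scanP p pos cnt = none := by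
  induction cnt with
  | zero => intro pos _; rfl
  | succ c ih =>
    intro pos h
    have hp : p pos = false := h pos le_rfl (by omega)
    simp only [scanP, hp, Bool.false_eq_true, if_false]
    exact ih (pos + 1) (fun j h1 h2 => h j (by omega) (by omega))

theorem scanP_some (p : Nat → Bool) (cnt : Nat) :
    ∀ pos q, p q = true → pos ≤ q → q < pos + cnt →
      (∀ j, pos ≤ j → j < q → p j = false) → scanP p pos cnt = some q := by
  induction cnt with
  | zero => intro pos q _ _ h2 _; omega
  | succ c ih =>
    intro pos q hq h1 h2 hmin
    by_cases he : pos = q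
    · subst he; simp [scanP, hq]
    · have hp : p pos = false := hmin pos le_rfl (by omega)
      simp only [scanP, hp, Bool.false_eq_true, if_false]
      exact ih (pos + 1) q hq (by omega) (by omega) (fun j ha hb => hmin j (by omega) hb)

theorem scanP_skip (p : Nat → Bool) (k : Nat) :
    ∀ pos c, (∀ j, pos ≤ j → j < pos + k → p j = false) →
      scanP p pos (k + c) = scanP p (pos + k) c := by
  induction k with
  | zero => intro pos c _; simp
  | succ k ih =>
    intro pos c h
    have hp : p pos = false := h pos le_rfl (by omega)
    have : k + 1 + c = (k + c) + 1 := by omega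
    rw [this]
    simp only [scanP, hp, Bool.false_eq_true, if_false]
    rw [ih (pos + 1) c (fun j h1 h2 => h j (by omega) (by omega))]
    congr 1
    omega

theorem prefix_drop_isInfix {sub l : List Char} {k : Nat} (h : sub <+: l.drop k) :
    sub <:+: l :=
  h.isInfix.trans (List.drop_suffix k l).isInfix

theorem bndB_iff (cap tok : List Char) (i : Nat) :
    bndB cap tok i = true ↔
      (cap.length ≤ i + tok.length ∨ PySem.Chars.isalpha (cap.getD (i + tok.length) ' ') = false) := by
  simp [bndB, Bool.or_eq_true]

-- the head-cons characterisation of a prefix at j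
theorem space_cons_prefix_iff (cap tok : List Char) (j : Nat) :
    (' ' :: tok) <+: cap.drop j ↔ (cap[j]? = some ' ' ∧ tok <+: cap.drop (j + 1)) := by
  by_cases hj : j < cap.length
  · rw [List.drop_eq_getElem_cons hj, List.cons_prefix_cons, List.getElem?_eq_getElem hj]
    constructor
    · rintro ⟨h1, h2⟩; exact ⟨by rw [← h1], h2⟩
    · rintro ⟨h1, h2⟩; refine ⟨?_, h2⟩; injection h1 with h1'; exact h1'.symm
  · have hdrop : cap.drop j = [] := List.drop_eq_nil_of_le (by omega)
    rw [hdrop, List.getElem?_eq_none (by omega)]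
    constructor
    · intro h; have := h.length_le; simp at this
    · rintro ⟨h, -⟩; exact absurd h (by simp)

-- ===== the A-side loop =====
theorem aLoop_eq (cap tok : List Char) (fuel : Nat) :
    ∀ pos, pos ≤ cap.length → cap.length - pos ≤ fuel →
    aLoop cap (' ' :: tok) tok.length fuel pos
      = (scanP (PA cap tok) pos (cap.length - pos)).map (fun i => i + 1) := by
  induction fuel with
  | zero =>
    intro pos _ hcnt
    have h0 : cap.length - pos = 0 := by omega
    rw [h0]
    rfl
  | succ f ih =>
    intro pos hle hcnt
    by_cases h : pos < cap.length
    · rw [aLoop, if_pos h]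
      by_cases hf : PySem.Chars.findFrom cap (' ' :: tok) (pos : Int) = -1
      · rw [if_pos hf]
        have hno : ¬ (' ' :: tok) <:+: cap.drop pos :=
          (PySem.Chars.findFrom_natCast_eq_neg_one_iff cap (' ' :: tok) pos hle).mp hf
        rw [scanP_none (PA cap tok) (cap.length - pos) pos ?_]
        · rfl
        · intro j h1 _
          have hpre : ¬ (' ' :: tok) <+: cap.drop j := by
            intro hp
            apply hno
            have : cap.drop j = (cap.drop pos).drop (j - pos) := by
              rw [List.drop_drop]; congr 1; omega
            rw [this] at hp
            exact prefix_drop_isInfix hp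
          simp [PA, hpre]
      · rw [if_neg hf]
        obtain ⟨hge, hpre, hmin⟩ :=
          PySem.Chars.findFrom_natCast_spec cap (' ' :: tok) pos hle hf
        set F := PySem.Chars.findFrom cap (' ' :: tok) (pos : Int) with hFdef
        have ht1 : pos ≤ F.toNat := by omega
        have hlen : F.toNat + (tok.length + 1) ≤ cap.length := by
          have := hpre.length_le
          simp [List.length_drop] at this
          omega
        by_cases hb : cap.length ≤ F.toNat + 1 + tok.length ∨
            PySem.Chars.isalpha (cap.getD (F.toNat + 1 + tok.length) ' ') = false
        · rw [if_pos hb]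
          have hPA : PA cap tok F.toNat = true := by
            have hbnd : bndB cap tok (F.toNat + 1) = true := (bndB_iff cap tok (F.toNat + 1)).mpr hb
            simp [PA, hpre, hbnd]
          rw [scanP_some (PA cap tok) (cap.length - pos) pos F.toNat hPA ht1 (by omega) ?_]
          · rfl
          · intro j h1 h2
            have := hmin j h1 h2
            simp [PA, this]
        · rw [if_neg hb]
          have hlt : F.toNat + 1 ≤ cap.length := by omega
          rw [ih (F.toNat + 1) hlt (by omega)]
          congr 1
          have hsplit : cap.length - pos
              = (F.toNat + 1 - pos) + (cap.length - (F.toNat + 1)) := by omega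
          rw [hsplit, scanP_skip (PA cap tok) (F.toNat + 1 - pos) pos _ ?_]
          · congr 1; omega
          · intro j h1 h2
            by_cases hj : j < F.toNat
            · have := hmin j h1 hj
              simp [PA, this]
            · have hjF : j = F.toNat := by omega
              have hbnd : bndB cap tok (F.toNat + 1) = false := by
                rw [Bool.eq_false_iff]
                exact fun hc => hb ((bndB_iff _ _ _).mp hc)
              rw [hjF]
              simp [PA, hbnd]
    · rw [aLoop, if_neg h]
      have h0 : cap.length - pos = 0 := by omega
      rw [h0]
      rfl

-- ===== the B-side occurrence list =====
theorem take_eq_iff_prefix {l tok : List Char} :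
    (List.take tok.length l = tok) ↔ tok <+: l := by
  constructor
  · intro he; rw [← he]; exact List.take_prefix _ _
  · rintro ⟨t, ht⟩; rw [← ht]; exact List.take_left

theorem occB_eq (cap tok : List Char) (k : Nat) :
    (PySem.List.slice cap (some (k : Int)) (some ((k : Int) + (tok.length : Int))) == tok)
      = decide (tok <+: cap.drop k) := by
  rw [PySem.List.slice_toNat cap (by positivity) (by positivity)]
  have h1 : ((k : Int) + (tok.length : Int)).toNat = k + tok.length := by omega
  have h2 : ((k : Int)).toNat = k := by omega
  rw [h1, h2]
  have h3 : k + tok.length - k = tok.length := by omega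
  rw [h3]
  rw [Bool.eq_iff_iff]
  simp only [beq_iff_eq, decide_eq_true_eq]
  exact take_eq_iff_prefix

theorem bOccs_eq (cap tok : List Char) :
    bOccs cap tok
      = List.map (fun k : Nat => (k : Int))
          ((List.range (cap.length + 1 - tok.length)).filter
            (fun k => decide (tok <+: cap.drop k))) := by
  unfold bOccs
  rw [PySem.List.pyRange_one]
  have h1 : ((cap.length : Int) - (tok.length : Int) + 1 - 0).toNat
      = cap.length + 1 - tok.length := by omega
  rw [h1, List.filter_map]
  have h2 : ∀ k ∈ List.range (cap.length + 1 - tok.length),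
      ((fun i => PySem.List.slice cap (some i) (some (i + (tok.length : Int))) == tok) ∘
        (fun k : Nat => (0 : Int) + (k : Int))) k = decide (tok <+: cap.drop k) := by
    intro k _
    simp only [Function.comp, zero_add]
    exact occB_eq cap tok k
  rw [List.filter_congr h2]
  exact List.map_congr_left (fun a _ => by simp)

theorem head?_filter_eq_find? {α : Type} (p : α → Bool) (l : List α) :
    (l.filter p).head? = l.find? p := by
  induction l with
  | nil => rfl
  | cons a l ih => cases hp : p a <;> simp [hp, ih]

theorem filter_range_cons_min {p : Nat → Bool} {r k : Nat} {ks : List Nat}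
    (h : (List.range r).filter p = k :: ks) :
    p k = true ∧ k < r ∧ ∀ j, j < k → p j = false := by
  have h1 : (List.range r).find? p = some k := by
    rw [← head?_filter_eq_find?, h]; rfl
  rw [List.find?_eq_some_iff_getElem] at h1
  obtain ⟨hpk, i, hi, hik, hmin⟩ := h1
  have hlen : i < r := by simpa using hi
  have hik' : i = k := by simpa using hik
  subst hik'
  refine ⟨hpk, hlen, fun j hj => ?_⟩
  have := hmin j hj
  simpa [List.getElem_range, Bool.not_eq_true'] using this

theorem find?_range_pad (p : Nat → Bool) (r r' : Nat) (hrr : r ≤ r')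
    (hfalse : ∀ i, r ≤ i → i < r' → p i = false) :
    (List.range r').find? p = (List.range r).find? p := by
  have hr : r' = r + (r' - r) := by omega
  rw [hr, List.range_add, List.find?_append]
  have h2 : (List.map (fun x => r + x) (List.range (r' - r))).find? p = none := by
    rw [List.find?_eq_none]
    intro x hx
    simp only [List.mem_map, List.mem_range] at hx
    obtain ⟨y, hy, rfl⟩ := hx
    simp [hfalse (r + y) (by omega) (by omega)]
  rw [h2, Option.or_none]

theorem PB_succ (cap tok : List Char) (k : Nat) :
    PB cap tok (k + 1) = PA cap tok k := by
  rw [Bool.eq_iff_iff]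
  simp only [PB, PA, Bool.and_eq_true, decide_eq_true_eq, beq_iff_eq]
  rw [space_cons_prefix_iff cap tok k]
  constructor
  · rintro ⟨⟨⟨_, h2⟩, h3⟩, h4⟩; exact ⟨⟨h2, h3⟩, h4⟩
  · rintro ⟨⟨h2, h3⟩, h4⟩; exact ⟨⟨⟨by omega, h2⟩, h3⟩, h4⟩

theorem PB_zero (cap tok : List Char) : PB cap tok 0 = false := by
  simp [PB]

-- the port's find? predicate equals PB on naturals
theorem pred_cast_eq (cap tok : List Char) (k : Nat) :
    (decide ((tok <+: cap.drop k)) &&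
      (decide (0 < (k : Int)) && (PySem.List.pyGet? cap ((k : Int) - 1) == some ' ') &&
        (decide ((cap.length : Int) ≤ (k : Int) + (tok.length : Int)) ||
          !(PySem.Chars.isalpha ((PySem.List.pyGet? cap ((k : Int) + (tok.length : Int))).getD ' ')))))
      = PB cap tok k := by
  cases k with
  | zero => simp [PB]
  | succ k' =>
    have e1 : ((k' + 1 : Nat) : Int) - 1 = ((k' : Nat) : Int) := by push_cast; ring
    have e2 : ((k' + 1 : Nat) : Int) + (tok.length : Int) = ((k' + 1 + tok.length : Nat) : Int) := by
      push_cast; ring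
    rw [e1, e2, PySem.List.pyGet?_natCast, PySem.List.pyGet?_natCast, Bool.eq_iff_iff]
    simp only [PB, bndB, Bool.and_eq_true, Bool.or_eq_true, decide_eq_true_eq, beq_iff_eq,
      Bool.not_eq_true', List.getD_eq_getElem?_getD, Nat.cast_le, Nat.cast_pos,
      Nat.add_sub_cancel]
    tauto

-- PB is false beyond the range bound
theorem PB_false_of_ge (cap tok : List Char) (i : Nat)
    (h1 : cap.length + 1 - tok.length ≤ i) : PB cap tok i = false := by
  by_cases hsp : cap[i-1]? = some ' '
  · by_cases hocc : tok <+: cap.drop i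
    · exfalso
      obtain ⟨hlt, -⟩ := List.getElem?_eq_some_iff.mp hsp
      have hlen := hocc.length_le
      simp only [List.length_drop] at hlen
      omega
    · simp [PB, hocc]
  · simp [PB, beq_iff_eq, hsp]

-- ===== the B-side phase-1 scan =====
theorem bPhase1_eq (cap tok : List Char) :
    (bOccs cap tok).find? (fun i =>
        decide (0 < i) && (PySem.List.pyGet? cap (i - 1) == some ' ') &&
        (decide ((cap.length : Int) ≤ i + (tok.length : Int)) ||
          !(PySem.Chars.isalpha ((PySem.List.pyGet? cap (i + (tok.length : Int))).getD ' '))))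
      = (scanP (PA cap tok) 0 cap.length).map (fun i => ((i + 1 : Nat) : Int)) := by
  rw [bOccs_eq, List.find?_map, List.find?_filter]
  have hfun : (fun (k : Nat) => decide ((decide (tok <+: cap.drop k)) = true ∧
      ((fun i => decide (0 < i) && (PySem.List.pyGet? cap (i - 1) == some ' ') &&
        (decide ((cap.length : Int) ≤ i + (tok.length : Int)) ||
          !(PySem.Chars.isalpha ((PySem.List.pyGet? cap (i + (tok.length : Int))).getD ' ')))) ∘
        (fun k : Nat => (k : Int))) k = true)) = PB cap tok := by
    funext k
    rw [← pred_cast_eq cap tok k, Bool.eq_iff_iff]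
    simp [Bool.and_eq_true, Function.comp]
  rw [hfun]
  rw [← find?_range_pad (PB cap tok) (cap.length + 1 - tok.length) (cap.length + 1) (by omega)
      (fun i hi _ => PB_false_of_ge cap tok i hi)]
  rw [List.range_succ_eq_map]
  rw [List.find?_cons_of_neg (by simp [PB_zero])]
  rw [List.find?_map]
  have hcomp : (PB cap tok) ∘ Nat.succ = PA cap tok :=
    funext (fun k => by simpa [Nat.succ_eq_add_one] using PB_succ cap tok k)
  rw [hcomp]
  rw [scanP_eq_find?_range' (PA cap tok) cap.length 0, ← List.range_eq_range']
  rw [Option.map_map]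
  cases List.find? (PA cap tok) (List.range cap.length) with
  | none => rfl
  | some a => simp [Nat.succ_eq_add_one]

-- ===== fallback =====
theorem fallback_eq (cap tok : List Char) :
    PySem.Chars.find cap tok
      = (match bOccs cap tok with | i :: _ => i | [] => -1) := by
  rw [bOccs_eq]
  cases hocc : (List.range (cap.length + 1 - tok.length)).filter
      (fun k => decide (tok <+: cap.drop k)) with
  | nil =>
    simp only [List.map_nil]
    rw [PySem.Chars.find_eq_neg_one_iff]
    intro hinf
    obtain ⟨j, hj⟩ := (PySem.Chars.exists_prefix_drop_iff_isIn tok cap).mpr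
      ((PySem.Chars.isIn_iff_infix tok cap).mpr hinf)
    have hnone := List.filter_eq_nil_iff.mp hocc
    by_cases hm : tok.length = 0
    · have htok : tok = [] := List.eq_nil_of_length_eq_zero hm
      have h0 := hnone 0 (List.mem_range.mpr (by omega))
      simp [htok] at h0
    · have hjl : tok.length ≤ cap.length - j := by
        have := hj.length_le
        simpa [List.length_drop] using this
      have hjr : j < cap.length + 1 - tok.length := by omega
      have := hnone j (List.mem_range.mpr hjr)
      simp at this
      exact this hj
  | cons k ks =>
    simp only [List.map_cons]
    show PySem.Chars.find cap tok = ((k : Nat) : Int)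
    obtain ⟨hpk, hkr, hkmin⟩ := filter_range_cons_min hocc
    have hocck : tok <+: cap.drop k := of_decide_eq_true hpk
    have hnn : 0 ≤ PySem.Chars.find cap tok :=
      (PySem.Chars.find_nonneg_iff cap tok).mpr (prefix_drop_isInfix hocck)
    obtain ⟨hFpre, hFmin⟩ := PySem.Chars.find_spec hnn
    have h1 : ¬ k < (PySem.Chars.find cap tok).toNat := fun hlt => hFmin k hlt hocck
    have h2 : ¬ (PySem.Chars.find cap tok).toNat < k := by
      intro hlt
      have := hkmin (PySem.Chars.find cap tok).toNat hlt
      simp at this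
      exact this hFpre
    have heq : (PySem.Chars.find cap tok).toNat = k := by omega
    rw [← Int.toNat_of_nonneg hnn, heq]

theorem zero_eq (cap tok : List Char) :
    PySem.Chars.startswith cap tok
      = (match bOccs cap tok with | i :: _ => i == (0 : Int) | [] => false) := by
  rw [bOccs_eq]
  cases hocc : (List.range (cap.length + 1 - tok.length)).filter
      (fun k => decide (tok <+: cap.drop k)) with
  | nil =>
    simp only [List.map_nil]
    show PySem.Chars.startswith cap tok = false
    rw [Bool.eq_false_iff]
    intro hsw
    have hpre : tok <+: cap := (PySem.Chars.startswith_iff cap tok).mp hsw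
    have h0 : (0 : Nat) ∈ List.range (cap.length + 1 - tok.length) :=
      List.mem_range.mpr (by have := hpre.length_le; omega)
    have := List.filter_eq_nil_iff.mp hocc 0 h0
    simp at this
    exact this hpre
  | cons k ks =>
    simp only [List.map_cons]
    show PySem.Chars.startswith cap tok = (((k : Nat) : Int) == 0)
    obtain ⟨hpk, hkr, hkmin⟩ := filter_range_cons_min hocc
    cases hsw : PySem.Chars.startswith cap tok with
    | true =>
      have hpre : tok <+: cap := (PySem.Chars.startswith_iff cap tok).mp hsw
      have hk0 : k = 0 := by
        by_contra hne
        have := hkmin 0 (by omega)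
        simp at this
        exact this hpre
      subst hk0
      simp
    | false =>
      have hnpre : ¬ tok <+: cap := by
        rw [← PySem.Chars.startswith_iff, hsw]
        simp
      have hk0 : k ≠ 0 := by
        intro h
        subst h
        exact hnpre (by simpa using of_decide_eq_true hpk)
      have : (((k : Nat) : Int) == 0) = false := by
        simp [hk0]
      rw [this]

theorem core_eq (cap tok : List Char) (sw : Bool) : aCore cap tok sw = bCore cap tok sw := by
  cases sw with
  | false => simpa [aCore, bCore] using fallback_eq cap tok
  | true =>
    simp only [aCore, bCore, if_true]
    rw [aLoop_eq cap tok cap.length 0 (Nat.zero_le _) (by omega), Nat.sub_zero, bPhase1_eq]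
    cases hs : scanP (PA cap tok) 0 cap.length with
    | some i => simp
    | none =>
      simp only [Option.map_none]
      rw [← zero_eq cap tok, ← fallback_eq cap tok]
      have hiff : (PySem.Chars.startswith cap tok = true ∧
          (cap.length ≤ tok.length ∨ PySem.Chars.isalpha (cap.getD tok.length ' ') = false)) ↔
          ((PySem.Chars.startswith cap tok &&
            (decide (cap.length ≤ tok.length) ||
              !(PySem.Chars.isalpha (cap.getD tok.length ' ')))) = true) := by
        simp [Bool.and_eq_true, Bool.or_eq_true]
      by_cases hc : PySem.Chars.startswith cap tok = true ∧
          (cap.length ≤ tok.length ∨ PySem.Chars.isalpha (cap.getD tok.length ' ') = false)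
      · rw [if_pos hc, if_pos (hiff.mp hc)]
      · rw [if_neg hc, if_neg (fun h => hc (hiff.mpr h))]

-- ===== VERDICT (by name: the statement is the Claim_ definition above) =====
theorem find_token_in_caption_py_spec : Claim_equal_find_token_in_caption_py := by
  intro caption token_str _
  unfold Spec_find_token_in_caption_py find_token_in_caption_py find_token_in_caption_py_alt
  exact core_eq _ _ _
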